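-- pv_equiv track=rewrite | github.com/Rian-Ismael/Questoes-Python | questões..py/quadrado magic.py | repetidos
-- ===== SOURCE A (Python) =====
-- def repetidos(matriz):
--     elementos = []
--     for i in range(len(matriz)):
--         for e in range(len(matriz[0])):
--             elementos.append(matriz[i][e])
--
--     for elemento in elementos:
--         cont = 0
--         for i in range(len(elementos)):
--             if elemento == elementos[i]:
--                 cont += 1
--                 if cont > 1:
--                     return False
--     return True
-- ===== SOURCE B (Python) =====
-- def repetidos(matriz):
--     elementos = []
--     for i in range(len(matriz)):
--         for e in range(len(matriz[0])):
--             elementos.append(matriz[i][e])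
--     ordenados = sorted(elementos)
--     for i in range(len(ordenados) - 1):
--         if ordenados[i] == ordenados[i + 1]:
--             return False
--     return True
-- ===== Notes on version B (the rewrite author's own statement) =====
-- stated objective: alternative
-- what changed: Replaces A's count-every-element duplicate scan with a different algorithm: flatten identically, sort once, and return False on the first equal adjacent pair.
import Mathlib
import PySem

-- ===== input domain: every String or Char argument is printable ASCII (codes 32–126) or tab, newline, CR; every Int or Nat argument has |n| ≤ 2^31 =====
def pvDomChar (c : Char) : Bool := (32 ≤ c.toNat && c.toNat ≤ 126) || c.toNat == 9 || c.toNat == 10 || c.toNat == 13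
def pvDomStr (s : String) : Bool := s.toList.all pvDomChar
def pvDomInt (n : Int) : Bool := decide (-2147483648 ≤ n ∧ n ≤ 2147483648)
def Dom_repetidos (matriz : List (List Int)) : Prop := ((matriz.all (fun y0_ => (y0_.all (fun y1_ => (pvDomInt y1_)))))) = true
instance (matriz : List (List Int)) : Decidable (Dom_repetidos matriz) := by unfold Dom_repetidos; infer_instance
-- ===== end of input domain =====

-- B tests for duplicates by sorting once and scanning adjacent pairs, instead of A's count-every-element scan (alternative algorithm, same measured speed).

-- ===== PORT A =====
-- the two flattening loops: for i in range(len(matriz)): for e in range(len(matriz[0])): elementos.append(matriz[i][e])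
def repA_flatten (matriz : List (List Int)) : List Int :=
  (PySem.List.pyRange 0 matriz.length 1).foldl
    (fun acc i =>
      (PySem.List.pyRange 0 (PySem.List.pyGetD matriz 0 []).length 1).foldl
        (fun acc2 e => acc2 ++ [PySem.List.pyGetD (PySem.List.pyGetD matriz i []) e 0]) acc) []

-- inner loop: cont = 0; for i in range(len(elementos)): if elemento == elementos[i]: cont += 1; if cont > 1: return False
-- (returns true exactly when A's early 'return False' fires)
def repA_inner : List Int → Int → Nat → Bool
  | [], _, _ => false
  | x :: rest, el, cont =>
    if el == x then
      (if cont + 1 > 1 then true else repA_inner rest el (cont + 1))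
    else repA_inner rest el cont

-- outer loop: for elemento in elementos: …
def repA_outer : List Int → List Int → Bool
  | [], _ => true
  | y :: rest, all => if repA_inner all y 0 then false else repA_outer rest all

def repetidos (matriz : List (List Int)) : Bool :=
  let elementos := repA_flatten matriz
  repA_outer elementos elementos

-- ===== PORT B =====
-- identical flattening loops as in Source B
def repB_flatten (matriz : List (List Int)) : List Int :=
  (PySem.List.pyRange 0 matriz.length 1).foldl
    (fun acc i =>
      (PySem.List.pyRange 0 (PySem.List.pyGetD matriz 0 []).length 1).foldl
        (fun acc2 e => acc2 ++ [PySem.List.pyGetD (PySem.List.pyGetD matriz i []) e 0]) acc) []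

-- for i in range(len(ordenados) - 1): if ordenados[i] == ordenados[i + 1]: return False
def repB_adj : List Int → Bool
  | [] => true
  | [_] => true
  | a :: b :: rest => if a == b then false else repB_adj (b :: rest)

def repetidos_alt (matriz : List (List Int)) : Bool :=
  let elementos := repB_flatten matriz
  repB_adj (PySem.List.sorted elementos (fun x => x) false)

-- ===== PRECONDITION & SPEC =====
-- A (and B) raise IndexError when some row is shorter than the first row; those inputs are excluded.
def Pre_repetidos (matriz : List (List Int)) : Prop :=
  ∀ row ∈ matriz, (matriz.headD []).length ≤ row.length
instance (matriz : List (List Int)) : Decidable (Pre_repetidos matriz) := by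
  unfold Pre_repetidos; infer_instance
def pvWitness_repetidos : List (List Int) := [[1, 2], [3, 4]]

def Spec_repetidos (matriz : List (List Int)) (out : Bool) : Prop := out = repetidos_alt matriz
instance (matriz : List (List Int)) (out : Bool) : Decidable (Spec_repetidos matriz out) := by unfold Spec_repetidos; infer_instance

-- ===== CLAIM (what is proved, stated in full; the proofs are below) =====
def Claim_equal_repetidos : Prop := ∀ (matriz : List (List Int)), Dom_repetidos matriz → Pre_repetidos matriz → Spec_repetidos matriz (repetidos matriz)

-- ===== LEMMAS AND PROOFS =====

theorem repA_inner_eq (xs : List Int) (el : Int) (cont : Nat) (h : cont ≤ 1) :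
    repA_inner xs el cont = decide (2 ≤ cont + xs.count el) := by
  induction xs generalizing cont with
  | nil => simp [repA_inner]; omega
  | cons x rest ih =>
    by_cases hx : el = x
    · subst hx
      simp only [repA_inner, beq_self_eq_true, if_true, List.count_cons_self]
      by_cases hc : cont + 1 > 1
      · have h2 : 2 ≤ cont + (rest.count el + 1) := by omega
        simp [hc, h2]
      · have hc0 : cont = 0 := by omega
        subst hc0
        simp only [if_neg hc, ih 1 (by omega)]
        congr 1
        simp only [eq_iff_iff]
        omega
    · have hb : (el == x) = false := by simp [hx]
      simp only [repA_inner, hb, Bool.false_eq_true, if_false]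
      rw [ih cont h, List.count_cons_of_ne (by exact fun he => hx he.symm)]

theorem repA_outer_eq (ys all : List Int) :
    repA_outer ys all = decide (∀ y ∈ ys, all.count y ≤ 1) := by
  induction ys with
  | nil => simp [repA_outer]
  | cons y rest ih =>
    simp only [repA_outer, repA_inner_eq all y 0 (by omega), ih]
    by_cases h : 2 ≤ 0 + all.count y
    · simp only [h, decide_true, if_true]
      symm
      simp only [decide_eq_false_iff_not]
      intro hall
      have := hall y List.mem_cons_self
      omega
    · simp only [h, decide_false, Bool.false_eq_true, if_false]
      congr 1
      simp only [eq_iff_iff, List.forall_mem_cons]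
      exact ⟨fun h2 => ⟨by omega, h2⟩, fun p => p.2⟩

theorem repA_eq_nodup (l : List Int) : repA_outer l l = decide l.Nodup := by
  rw [repA_outer_eq]
  congr 1
  simp only [eq_iff_iff, List.nodup_iff_count_le_one]
  constructor
  · intro h a
    by_cases ha : a ∈ l
    · exact h a ha
    · simp [List.count_eq_zero_of_not_mem ha]
  · intro h y _; exact h y

theorem repB_adj_eq_nodup (xs : List Int) (hs : xs.Pairwise (· ≤ ·)) :
    repB_adj xs = decide xs.Nodup := by
  induction xs with
  | nil => simp [repB_adj]
  | cons a rest ih =>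
    cases rest with
    | nil => simp [repB_adj]
    | cons b rest2 =>
      have hab : a ≤ b := (List.pairwise_cons.mp hs).1 b List.mem_cons_self
      have htail : (b :: rest2).Pairwise (· ≤ ·) := (List.pairwise_cons.mp hs).2
      by_cases he : a = b
      · subst he
        simp [repB_adj, List.nodup_cons]
      · have hb : (a == b) = false := by simp [he]
        have hlt : a < b := lt_of_le_of_ne hab he
        simp only [repB_adj, hb, Bool.false_eq_true, if_false, ih htail]
        congr 1
        simp only [eq_iff_iff, List.nodup_cons]
        constructor
        · intro h
          refine ⟨?_, h⟩
          intro hmem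
          rcases List.mem_cons.mp hmem with h1 | h1
          · exact he h1
          · have : b ≤ a := (List.pairwise_cons.mp htail).1 a h1
            omega
        · exact fun h => h.2

-- ===== VERDICT (by name: the statement is the Claim_ definition above) =====
theorem repetidos_spec : Claim_equal_repetidos := by
  intro matriz _ _
  unfold Spec_repetidos repetidos repetidos_alt
  have hflat : repB_flatten matriz = repA_flatten matriz := rfl
  rw [hflat]
  set l := repA_flatten matriz with hl
  rw [repA_eq_nodup]
  have hs : (PySem.List.sorted l (fun x => x) false).Pairwise (· ≤ ·) := by
    have := PySem.List.sorted_pairwise (xs := l) (key := fun x => x)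
    simpa using this
  rw [repB_adj_eq_nodup _ hs]
  congr 1
  simp only [eq_iff_iff]
  exact ((PySem.List.sorted_perm (xs := l) (key := fun x => x) (rev := false)).nodup_iff).symm
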